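-- pv_equiv track=rewrite | github.com/bakipin/bipolar-disorder-recognition | experiments.py | majority_voting_pred
-- ===== SOURCE A (Python) =====
-- from collections import Counter
--
-- def majority(arr):
--     # convert array into dictionary
--     freqDict = Counter(arr)
--     # traverse dictionary and check majority element
--     size = len(arr)
--     major_key = None
--     major_val = 1
--     for (key, val) in freqDict.items():
--         if (val > (size / 2)):
--             return key
--         else:
--             if val > major_val:
--                 major_key = key
--                 major_val = val
--             elif val == major_val:
--                 major_key = None
--
--     return major_key
--
-- def majority_voting_pred(predictions, weight_index=None):
--     i = 0
--     voted_preds = []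
--     len_pred = len(predictions[0])
--     default_val = 2
--
--     while i < len_pred:
--         pred_arr = list(map(lambda x: x[i], predictions))
--         mv = majority(pred_arr)
--         if mv is None:
--             if weight_index is not None:
--                 mv = predictions[weight_index][i]
--             # Minority class is chosen if each classifier predicts a different label
--             else:
--                 mv = default_val
--         voted_preds.append(mv)
--         i += 1
--     return voted_preds
-- ===== SOURCE B (Python) =====
-- def majority_voting_pred(predictions, weight_index=None):
--     voted_preds = []
--     for i in range(len(predictions[0])):
--         col = sorted(x[i] for x in predictions)
--         n = len(col)
--         best = None
--         best_len = 0
--         tie = False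
--         j = 0
--         while j < n:
--             k = j
--             while k < n and col[k] == col[j]:
--                 k += 1
--             run = k - j
--             if run > best_len:
--                 best, best_len, tie = col[j], run, False
--             elif run == best_len:
--                 tie = True
--             j = k
--         if best is not None and not tie:
--             voted_preds.append(best)
--         elif weight_index is not None:
--             voted_preds.append(predictions[weight_index][i])
--         else:
--             voted_preds.append(2)
--     return voted_preds
-- ===== Notes on version B (the rewrite author's own statement) =====
-- stated objective: alternative
-- what changed: B drops the Counter entirely: it sorts each column and scans the sorted list run by run (nested index loops), voting the head of the unique longest run; A builds a Counter and does a single-pass running-max scan with a tie-reset sentinel and an early over-half return.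
import Mathlib
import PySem

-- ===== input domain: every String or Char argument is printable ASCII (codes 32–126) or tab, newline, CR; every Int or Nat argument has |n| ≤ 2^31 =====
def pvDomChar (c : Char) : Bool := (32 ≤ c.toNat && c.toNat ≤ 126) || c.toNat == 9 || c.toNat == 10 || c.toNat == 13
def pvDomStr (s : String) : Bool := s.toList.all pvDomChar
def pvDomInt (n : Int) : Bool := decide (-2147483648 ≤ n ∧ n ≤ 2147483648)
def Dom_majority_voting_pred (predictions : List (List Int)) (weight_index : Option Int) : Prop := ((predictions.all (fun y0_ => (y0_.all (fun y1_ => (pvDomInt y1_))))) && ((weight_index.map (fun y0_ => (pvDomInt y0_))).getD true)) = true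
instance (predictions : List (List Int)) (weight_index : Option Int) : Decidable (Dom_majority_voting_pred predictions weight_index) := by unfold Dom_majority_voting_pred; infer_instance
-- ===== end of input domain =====

-- B replaces A's Counter + single-pass running-max scan (tie-reset sentinel, early over-half
-- return) by sorting each column and scanning it run by run: the vote is the head of the
-- unique longest run, else the fallback (objective: alternative algorithm, similar cost).

-- ===== PORT A =====
-- helper 'majority' of A; Python's 'val > size / 2' on ints is exactly '2 * val > size';
-- the for-loop with its early 'return key' is the foldl, Sum.inl = already returned.
def pyMajority (arr : List Int) : Option Int :=
  let freqDict := PySem.Dict.counter (κ := Int) arr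
  let size : Int := (arr.length : Int)
  let st : Sum Int (Option Int × Int) :=
    freqDict.items.foldl (fun st kv =>
      match st with
      | Sum.inl r => Sum.inl r
      | Sum.inr (major_key, major_val) =>
        if 2 * kv.2 > size then Sum.inl kv.1
        else if kv.2 > major_val then Sum.inr (some kv.1, kv.2)
        else if kv.2 = major_val then Sum.inr ((none : Option Int), major_val)
        else Sum.inr (major_key, major_val)) (Sum.inr ((none : Option Int), (1 : Int)))
  match st with
  | Sum.inl r => some r
  | Sum.inr (mk, _) => mk

def majority_voting_pred (predictions : List (List Int)) (weight_index : Option Int) : List Int :=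
  let len_pred : Int := ((PySem.List.pyGetD predictions 0 []).length : Int)
  let default_val : Int := 2
  (PySem.List.pyRange 0 len_pred 1).foldl (fun voted_preds i =>
    let pred_arr := predictions.map (fun x => PySem.List.pyGetD x i 0)
    let mv : Int :=
      match pyMajority pred_arr with
      | some v => v
      | none =>
        match weight_index with
        | some w => PySem.List.pyGetD (PySem.List.pyGetD predictions w []) i 0
        | none => default_val
    voted_preds ++ [mv]) []

-- ===== PORT B =====
-- B's outer while j < n with the inner run-counting while k < n ∧ col[k] == col[j]:
-- on the sorted column suffix x :: xs the inner while counts 1 + takeWhile (== x) of xs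
-- (col[j] == col[j] always holds) and the outer loop resumes at the dropped suffix.
def pvRunScan (col : List Int) (best : Option Int) (bestLen : Int) (tie : Bool) :
    Option Int × Int × Bool :=
  match col with
  | [] => (best, bestLen, tie)
  | x :: xs =>
    let run : Int := ((xs.takeWhile (fun y => y == x)).length : Int) + 1
    let rest := xs.dropWhile (fun y => y == x)
    if run > bestLen then pvRunScan rest (some x) run false
    else if run = bestLen then pvRunScan rest best bestLen true
    else pvRunScan rest best bestLen tie
termination_by col.length
decreasing_by
  all_goals
    simp only [List.length_cons]
    exact Nat.lt_succ_of_le (List.Sublist.length_le (List.dropWhile_sublist _))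

def majority_voting_pred_alt (predictions : List (List Int)) (weight_index : Option Int) : List Int :=
  (PySem.List.pyRange 0 ((PySem.List.pyGetD predictions 0 []).length : Int) 1).foldl
    (fun voted_preds i =>
      let col := PySem.List.sorted (predictions.map (fun x => PySem.List.pyGetD x i 0))
        (fun v => v) false
      let r := pvRunScan col none 0 false
      let mv : Int :=
        match r.1, r.2.2 with
        | some b, false => b
        | _, _ =>
          match weight_index with
          | some w => PySem.List.pyGetD (PySem.List.pyGetD predictions w []) i 0
          | none => 2
      voted_preds ++ [mv]) []

-- ===== PRECONDITION & SPEC =====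
-- 'column col has a unique most-frequent value' (then A's majority() returns it and
-- weight_index is never used as an index): a closed-form count/shape condition on the input.
def pvTopCnt (col : List Int) : Nat := (col.map (fun v => col.count v)).foldl max 0
def pvUniqueTop (col : List Int) : Bool :=
  ((PySem.List.dedup col).filter (fun k => col.count k == pvTopCnt col)).length == 1
def pvWeightOk (predictions : List (List Int)) (weight_index : Option Int) : Bool :=
  match weight_index with
  | none => true
  | some w =>
    (decide (-(predictions.length : Int) ≤ w ∧ w < (predictions.length : Int))) ||
    (decide (∀ i, i < (predictions.headD []).length →
      pvUniqueTop (predictions.map (fun row => row.getD i 0)) = true))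

-- Pre_ excludes exactly the inputs where the Python A raises IndexError: empty predictions
-- (predictions[0]), a row shorter than the first row (x[i]), and an out-of-range weight_index
-- that is actually used, i.e. some column has no unique most-frequent value.
def Pre_majority_voting_pred (predictions : List (List Int)) (weight_index : Option Int) : Prop :=
  predictions ≠ [] ∧
  (∀ row ∈ predictions, (predictions.headD []).length ≤ row.length) ∧
  pvWeightOk predictions weight_index = true
instance (predictions : List (List Int)) (weight_index : Option Int) : Decidable (Pre_majority_voting_pred predictions weight_index) := by unfold Pre_majority_voting_pred; infer_instance

def pvWitness_majority_voting_pred : List (List Int) × Option Int := ([[0, 1], [0, 2]], none)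

def Spec_majority_voting_pred (predictions : List (List Int)) (weight_index : Option Int) (out : List Int) : Prop := out = majority_voting_pred_alt predictions weight_index
instance (predictions : List (List Int)) (weight_index : Option Int) (out : List Int) : Decidable (Spec_majority_voting_pred predictions weight_index out) := by unfold Spec_majority_voting_pred; infer_instance

-- ===== CLAIM (what is proved, stated in full; the proofs are below) =====
def Claim_equal_majority_voting_pred : Prop := ∀ (predictions : List (List Int)) (weight_index : Option Int), Dom_majority_voting_pred predictions weight_index → Pre_majority_voting_pred predictions weight_index → Spec_majority_voting_pred predictions weight_index (majority_voting_pred predictions weight_index)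

-- ===== LEMMAS AND PROOFS =====

-- A's loop step, seen over the distinct values of col (Counter(col).items() carries (k, count k))
def mstep (col : List Int) (st : Sum Int (Option Int × Int)) (k : Int) : Sum Int (Option Int × Int) :=
  match st with
  | Sum.inl r => Sum.inl r
  | Sum.inr (mk, mv) =>
    if 2 * (col.count k : Int) > (col.length : Int) then Sum.inl k
    else if (col.count k : Int) > mv then Sum.inr (some k, (col.count k : Int))
    else if (col.count k : Int) = mv then Sum.inr ((none : Option Int), mv)
    else Sum.inr (mk, mv)

-- running maximum of counts over the processed prefix p (A's major_val)
def maxvP (col p : List Int) : Int := p.foldl (fun m k => max m ((col.count k : Int))) 1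

-- what A's major_key is after processing p: the unique count-maximiser of p if its count ≥ 2
def candP (col p : List Int) : Option Int :=
  match p.filter (fun k => (col.count k : Int) == maxvP col p) with
  | [w] => if 2 ≤ (col.count w : Int) then some w else none
  | _ => none

-- A's early return: first key of p whose count exceeds half the column length
def bigP (col p : List Int) : Option Int :=
  p.find? (fun k => decide (2 * (col.count k : Int) > (col.length : Int)))

theorem maxvP_bounds (col p : List Int) :
    1 ≤ maxvP col p ∧ ∀ k ∈ p, (col.count k : Int) ≤ maxvP col p := by
  simpa [maxvP] using PySem.List.le_foldl_max_int p (fun k => (col.count k : Int)) 1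

theorem maxvP_attained (col p : List Int) (hp : p ≠ [])
    (hone : ∀ k ∈ p, (1 : Int) ≤ (col.count k : Int)) :
    ∃ j ∈ p, (col.count j : Int) = maxvP col p := by
  have h : maxvP col p = (p.map (fun k => (col.count k : Int))).foldl max 1 := by
    simp [maxvP, List.foldl_map]
  rcases PySem.List.foldl_max_mem (p.map (fun k => (col.count k : Int))) 1 with h1 | h1
  · obtain ⟨j, hj⟩ := List.exists_mem_of_ne_nil p hp
    refine ⟨j, hj, ?_⟩
    have h2 := (maxvP_bounds col p).2 j hj
    have h3 := hone j hj
    rw [h] at h2 ⊢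
    omega
  · rw [h]
    rcases List.mem_map.mp h1 with ⟨j, hj, hje⟩
    exact ⟨j, hj, hje⟩

theorem filter_app_singleton (l1 : List Int) (p : Int → Bool) (k : Int) :
    (l1 ++ [k]).filter p = l1.filter p ++ if p k then [k] else [] := by
  simp [List.filter_append]; split <;> simp_all [List.filter]

-- loop invariant of A's majority(): the fold either returned early at the first
-- over-half count, or carries (candP, maxvP) of the processed prefix
theorem fold_char (col p : List Int)
    (hone : ∀ k ∈ p, (1 : Int) ≤ (col.count k : Int)) :
    p.foldl (mstep col) (Sum.inr ((none : Option Int), (1 : Int))) =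
      match bigP col p with
      | some k => Sum.inl k
      | none => Sum.inr (candP col p, maxvP col p) := by
  induction p using List.reverseRecOn with
  | nil => simp [bigP, candP, maxvP]
  | append_singleton p k ih =>
    have hone' : ∀ j ∈ p, (1 : Int) ≤ (col.count j : Int) := fun j hj => hone j (List.mem_append_left _ hj)
    have honek : (1 : Int) ≤ (col.count k : Int) := hone k (by simp)
    have hbigapp : bigP col (p ++ [k]) =
        (bigP col p).or (if 2 * (col.count k : Int) > (col.length : Int) then some k else none) := by
      rw [bigP, List.find?_append]
      congr 1
      simp [List.find?]; split <;> simp_all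
    rw [List.foldl_append, ih hone', hbigapp]
    simp only [List.foldl_cons, List.foldl_nil]
    cases hb : bigP col p with
    | some r => simp [mstep]
    | none =>
      simp only [Option.none_or]
      by_cases hbig : 2 * (col.count k : Int) > (col.length : Int)
      · simp [mstep, hbig]
      · rw [if_neg hbig]
        have hmax : maxvP col (p ++ [k]) = max (maxvP col p) (col.count k : Int) := by
          simp [maxvP, List.foldl_append]
        have hub := (maxvP_bounds col p).2
        have hlb := (maxvP_bounds col p).1
        rcases lt_trichotomy (maxvP col p) ((col.count k : Int)) with hlt | heq | hgt
        · have hm : maxvP col (p ++ [k]) = (col.count k : Int) := by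
            rw [hmax]; exact max_eq_right (le_of_lt hlt)
          have hfp : p.filter (fun j => (col.count j : Int) == (col.count k : Int)) = [] := by
            rw [List.filter_eq_nil_iff]
            intro j hj
            have := hub j hj
            simp only [beq_iff_eq]
            omega
          have hcand : candP col (p ++ [k]) = some k := by
            rw [candP, hm, filter_app_singleton, hfp]
            simp only [beq_self_eq_true, if_pos]
            rw [List.nil_append]
            simp only []
            rw [if_pos (by omega)]
          have hstep : mstep col (Sum.inr (candP col p, maxvP col p)) k
              = Sum.inr (some k, (col.count k : Int)) := by
            rw [mstep]
            rw [if_neg hbig, if_pos (by omega)]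
          rw [hstep, hcand, hm]
        · -- count k = running max of p: the tie resets major_key to None
          have hm : maxvP col (p ++ [k]) = maxvP col p := by rw [hmax]; omega
          have hcand : candP col (p ++ [k]) = none := by
            rw [candP, hm, filter_app_singleton, if_pos (by simp [heq])]
            rcases List.eq_nil_or_concat' p with rfl | hc
            · simp only [List.filter_nil, List.nil_append]
              have h1 : (col.count k : Int) = 1 := by
                simp only [maxvP, List.foldl_nil] at heq; omega
              simp only [h1]
              rw [if_neg (by omega)]
            · have hpne : p ≠ [] := by
                rintro rfl; rcases hc with ⟨L, b, h⟩
                exact (List.append_ne_nil_of_right_ne_nil L (by simp) h.symm).elim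
              obtain ⟨j, hj, hje⟩ := maxvP_attained col p hpne hone'
              rcases hfp : p.filter (fun x => (col.count x : Int) == maxvP col p) with _ | ⟨a, t⟩
              · exfalso
                have hjm : j ∈ p.filter (fun x => (col.count x : Int) == maxvP col p) :=
                  List.mem_filter.mpr ⟨hj, by simp [hje]⟩
                rw [hfp] at hjm; simp at hjm
              · cases t <;> simp
          have hstep : mstep col (Sum.inr (candP col p, maxvP col p)) k
              = Sum.inr (none, maxvP col p) := by
            rw [mstep]
            rw [if_neg hbig, if_neg (by omega), if_pos heq.symm]
          rw [hstep, hcand, hm]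
        · -- count k below the running max: nothing changes
          have hm : maxvP col (p ++ [k]) = maxvP col p := by rw [hmax]; omega
          have hcand : candP col (p ++ [k]) = candP col p := by
            rw [candP, candP, hm, filter_app_singleton, if_neg (by simp; omega)]
            rw [List.append_nil]
          have hstep : mstep col (Sum.inr (candP col p, maxvP col p)) k
              = Sum.inr (candP col p, maxvP col p) := by
            rw [mstep]
            rw [if_neg hbig, if_neg (by omega), if_neg (by omega)]
          rw [hstep, hcand, hm]

theorem count_pair_le (a b : Int) (h : a ≠ b) (l : List Int) : l.count a + l.count b ≤ l.length := by
  induction l with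
  | nil => simp
  | cons x t ih =>
    simp only [List.count_cons, List.length_cons]
    rcases eq_or_ne x a with rfl | ha <;> rcases eq_or_ne x b with rfl | hb <;> simp_all <;> omega

theorem nodup_filter_singleton (l : List Int) (hn : l.Nodup) (a : Int) (ha : a ∈ l)
    (p : Int → Bool) (hpa : p a = true) (huniq : ∀ x ∈ l, p x = true → x = a) :
    l.filter p = [a] := by
  induction l with
  | nil => simp at ha
  | cons x t ih =>
    rcases List.mem_cons.mp ha with rfl | hat
    · have ht : t.filter p = [] := by
        rw [List.filter_eq_nil_iff]
        intro y hy hpy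
        have := huniq y (List.mem_cons_of_mem _ hy) hpy
        subst this
        exact (List.nodup_cons.mp hn).1 hy
      simp [hpa, ht]
    · have hxa : x ≠ a := by rintro rfl; exact (List.nodup_cons.mp hn).1 hat
      have hpx : p x = false := by
        rcases hpf : p x with _ | _
        · rfl
        · exact (hxa (huniq x (List.mem_cons_self) hpf)).elim
      rw [List.filter_cons_of_neg (by simp [hpx])]
      exact ih (List.nodup_cons.mp hn).2 hat (fun y hy hpy => huniq y (List.mem_cons_of_mem _ hy) hpy)

-- the crux on A's side: A's majority(col) is "the unique count-maximiser of col, if any"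
theorem pyMajority_char (col : List Int) (h : col ≠ []) :
    pyMajority col =
      (match (PySem.Set.ofList col).filter
          (fun k => (col.count k : Int) == maxvP col (PySem.Set.ofList col)) with
        | [w] => some w
        | _ => none) := by
  have hfold : (PySem.Dict.counter (κ := Int) col).items.foldl
      (fun st kv =>
        match st with
        | Sum.inl r => Sum.inl r
        | Sum.inr (major_key, major_val) =>
          if 2 * kv.2 > (col.length : Int) then Sum.inl kv.1
          else if kv.2 > major_val then Sum.inr (some kv.1, kv.2)
          else if kv.2 = major_val then Sum.inr ((none : Option Int), major_val)
          else Sum.inr (major_key, major_val)) (Sum.inr ((none : Option Int), (1 : Int)))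
      = (PySem.Set.ofList col).foldl (mstep col) (Sum.inr ((none : Option Int), (1 : Int))) := by
    rw [PySem.Dict.items_counter, List.foldl_map]
    rfl
  have hone : ∀ k ∈ PySem.Set.ofList col, (1 : Int) ≤ (col.count k : Int) := by
    intro k hk
    have : k ∈ col := (PySem.Set.mem_ofList _ _).mp hk
    have := List.count_pos_iff.mpr this
    omega
  have hchar := fold_char col (PySem.Set.ofList col) hone
  rw [pyMajority]
  rw [hfold, hchar]
  cases hb : bigP col (PySem.Set.ofList col) with
  | some k =>
    have hk : k ∈ PySem.Set.ofList col := List.mem_of_find?_eq_some hb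
    have hkcol : k ∈ col := (PySem.Set.mem_ofList _ _).mp hk
    have hpk : 2 * (col.count k : Int) > (col.length : Int) := by
      have := List.find?_some hb
      simpa using this
    have hstrict : ∀ j ∈ PySem.Set.ofList col, j ≠ k → (col.count j : Int) < (col.count k : Int) := by
      intro j hj hjk
      have := count_pair_le j k hjk col
      omega
    have hmv : maxvP col (PySem.Set.ofList col) = (col.count k : Int) := by
      obtain ⟨j, hj, hje⟩ := maxvP_attained col _ (by
        intro hnil; rw [hnil] at hk; simp at hk) hone
      have h1 := (maxvP_bounds col (PySem.Set.ofList col)).2 k hk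
      rcases eq_or_ne j k with rfl | hjk
      · omega
      · have := hstrict j hj hjk; omega
    have hfilt : (PySem.Set.ofList col).filter
        (fun j => (col.count j : Int) == maxvP col (PySem.Set.ofList col)) = [k] := by
      apply nodup_filter_singleton _ (PySem.Set.nodup_ofList _) k hk
      · simp [hmv]
      · intro x hx hpx
        simp only [hmv, beq_iff_eq] at hpx
        by_contra hxk
        have := hstrict x hx hxk
        omega
    rw [hfilt]
  | none =>
    rcases hf : (PySem.Set.ofList col).filter
        (fun j => (col.count j : Int) == maxvP col (PySem.Set.ofList col)) with _ | ⟨w, t⟩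
    · rw [candP, hf]
    · rcases t with _ | ⟨b, t2⟩
      · -- a unique maximiser: its count must be ≥ 2 (else the whole column is that one
        -- value and A would have returned early), so candP keeps it
        have hw : w ∈ PySem.Set.ofList col ∧
            ((col.count w : Int) == maxvP col (PySem.Set.ofList col)) = true := by
          have : w ∈ (PySem.Set.ofList col).filter
              (fun j => (col.count j : Int) == maxvP col (PySem.Set.ofList col)) := by rw [hf]; simp
          exact List.mem_filter.mp this
        have hwm : (col.count w : Int) = maxvP col (PySem.Set.ofList col) := by
          simpa using hw.2
        have h2w : 2 ≤ (col.count w : Int) := by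
          by_contra hlt
          have hwc : w ∈ col := (PySem.Set.mem_ofList _ _).mp hw.1
          have hcp := List.count_pos_iff.mpr hwc
          have hw1 : (col.count w : Int) = 1 := by omega
          have hall : ∀ j ∈ PySem.Set.ofList col,
              ((col.count j : Int) == maxvP col (PySem.Set.ofList col)) = true := by
            intro j hj
            have h1 := hone j hj
            have h2 := (maxvP_bounds col (PySem.Set.ofList col)).2 j hj
            simp only [beq_iff_eq]
            omega
          have hself : (PySem.Set.ofList col).filter
              (fun j => (col.count j : Int) == maxvP col (PySem.Set.ofList col))
              = PySem.Set.ofList col := List.filter_eq_self.mpr hall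
          have hS : PySem.Set.ofList col = [w] := by rw [← hself, hf]
          have hallw : ∀ c ∈ col, w = c := by
            intro c hc
            have : c ∈ PySem.Set.ofList col := (PySem.Set.mem_ofList _ _).mpr hc
            rw [hS] at this; simp at this; omega
          have hcl : col.count w = col.length := List.count_eq_length.mpr hallw
          have hlen : 0 < col.length := List.length_pos_iff.mpr h
          have : bigP col (PySem.Set.ofList col) ≠ none := by
            rw [bigP]
            intro hcon
            have := List.find?_eq_none.mp hcon w hw.1
            simp at this
            omega
          exact this hb
        rw [candP, hf]
        simp only []
        rw [if_pos h2w]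
      · rw [candP, hf]

-- ===== B-side lemmas =====

-- B's run step, seen over the heads of the runs of the sorted column
def bstep (full : List Int) (st : Option Int × Int × Bool) (k : Int) : Option Int × Int × Bool :=
  if (full.count k : Int) > st.2.1 then (some k, (full.count k : Int), false)
  else if (full.count k : Int) = st.2.1 then (st.1, st.2.1, true)
  else st

-- the first element of each run of col (for a sorted col: its distinct values, increasing)
def runHeads : List Int → List Int
  | [] => []
  | x :: xs => x :: runHeads (xs.dropWhile (fun y => y == x))
termination_by col => col.length
decreasing_by
  simp only [List.length_cons]
  exact Nat.lt_succ_of_le (List.Sublist.length_le (List.dropWhile_sublist _))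

-- running maximum of counts with initial value 0 (B's best_len)
def maxB (full p : List Int) : Int := p.foldl (fun m k => max m ((full.count k : Int))) 0

theorem maxB_bounds (full p : List Int) :
    0 ≤ maxB full p ∧ ∀ k ∈ p, (full.count k : Int) ≤ maxB full p := by
  simpa [maxB] using PySem.List.le_foldl_max_int p (fun k => (full.count k : Int)) 0

theorem maxB_attained (full p : List Int) (hp : p ≠ [])
    (hone : ∀ k ∈ p, (1 : Int) ≤ (full.count k : Int)) :
    ∃ j ∈ p, (full.count j : Int) = maxB full p := by
  have h : maxB full p = (p.map (fun k => (full.count k : Int))).foldl max 0 := by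
    simp [maxB, List.foldl_map]
  rcases PySem.List.foldl_max_mem (p.map (fun k => (full.count k : Int))) 0 with h1 | h1
  · obtain ⟨j, hj⟩ := List.exists_mem_of_ne_nil p hp
    have h2 := (maxB_bounds full p).2 j hj
    have h3 := hone j hj
    refine ⟨j, hj, ?_⟩
    rw [h] at h2 ⊢
    omega
  · rw [h]
    rcases List.mem_map.mp h1 with ⟨j, hj, hje⟩
    exact ⟨j, hj, hje⟩

-- on a sorted list x :: xs, the first run is exactly all copies of x,
-- and everything after it is strictly larger
theorem run_facts (x : Int) (xs : List Int) (hs : (x :: xs).Pairwise (· ≤ ·)) :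
    ((x :: xs).count x : Int) = ((xs.takeWhile (fun y => y == x)).length : Int) + 1
    ∧ ∀ k ∈ xs.dropWhile (fun y => y == x), x < k := by
  have hsplit : xs = xs.takeWhile (fun y => y == x) ++ xs.dropWhile (fun y => y == x) :=
    (List.takeWhile_append_dropWhile).symm
  have htake : ∀ y ∈ xs.takeWhile (fun y => y == x), y = x := by
    intro y hy
    have := List.mem_takeWhile_imp hy
    simpa using this
  have hgt : ∀ k ∈ xs.dropWhile (fun y => y == x), x < k := by
    rcases hd : xs.dropWhile (fun y => y == x) with _ | ⟨y, d'⟩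
    · intro k hk; simp at hk
    · have hyne : (y == x) = false := by
        have h := List.head?_dropWhile_not (fun y => y == x) xs
        rw [hd] at h
        exact h
      have hymem : y ∈ xs := by
        have hm : y ∈ xs.dropWhile (fun y => y == x) := by rw [hd]; simp
        exact (List.dropWhile_sublist _).mem hm
      have hxy : x ≤ y := (List.pairwise_cons.mp hs).1 y hymem
      have hne : x ≠ y := by intro he; subst he; simp at hyne
      have hxy' : x < y := lt_of_le_of_ne hxy hne
      have hsub : (y :: d').Sublist (x :: xs) := by
        conv_rhs => rw [show x :: xs = x :: (xs.takeWhile (fun y => y == x) ++ xs.dropWhile (fun y => y == x)) by rw [← hsplit]]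
        rw [hd]
        exact List.Sublist.cons _ (List.sublist_append_right _ _)
      have hyd : ∀ k ∈ d', y ≤ k := (List.pairwise_cons.mp (hs.sublist hsub)).1
      intro k hk
      rcases List.mem_cons.mp hk with rfl | hk'
      · exact hxy'
      · exact lt_of_lt_of_le hxy' (hyd k hk')
  refine ⟨?_, hgt⟩
  have h2 : (xs.dropWhile (fun y => y == x)).count x = 0 := by
    rw [List.count_eq_zero]
    intro hmem
    exact absurd rfl (ne_of_gt (hgt x hmem))
  have h1 : (xs.takeWhile (fun y => y == x)).count x
      = (xs.takeWhile (fun y => y == x)).length :=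
    List.count_eq_length.mpr (fun y hy => (htake y hy).symm)
  have hcx : (x :: xs).count x = (xs.takeWhile (fun y => y == x)).length + 1 := by
    rw [List.count_cons_self]
    conv_lhs => rw [hsplit]
    rw [List.count_append, h1, h2]
  omega

-- run heads of a sorted list: distinct, members of the list
theorem runHeads_facts : ∀ (col : List Int), col.Pairwise (· ≤ ·) →
    (runHeads col).Nodup ∧ (∀ k, k ∈ runHeads col ↔ k ∈ col) := by
  intro col
  induction col using runHeads.induct with
  | case1 => intro _; simp [runHeads]
  | case2 x xs ih =>
    intro hs
    have hfacts := run_facts x xs hs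
    have hrest : (xs.dropWhile (fun y => y == x)).Pairwise (· ≤ ·) :=
      (List.pairwise_cons.mp hs).2.sublist (List.dropWhile_sublist _)
    obtain ⟨ihnd, ihmem⟩ := ih hrest
    rw [runHeads]
    constructor
    · refine List.nodup_cons.mpr ⟨?_, ihnd⟩
      intro hx
      have := hfacts.2 x ((ihmem x).mp hx)
      omega
    · intro k
      constructor
      · intro hk
        rcases List.mem_cons.mp hk with rfl | hk'
        · simp
        · exact List.mem_cons_of_mem _ ((List.dropWhile_sublist _).mem ((ihmem k).mp hk'))
      · intro hk
        rcases List.mem_cons.mp hk with rfl | hk'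
        · simp
        · by_cases hkx : k = x
          · subst hkx; simp
          · have hk2 : k ∈ xs.takeWhile (fun y => y == x) ++ xs.dropWhile (fun y => y == x) := by
              rw [List.takeWhile_append_dropWhile]; exact hk'
            rcases List.mem_append.mp hk2 with h1 | h1
            · exact absurd (by simpa using List.mem_takeWhile_imp h1) hkx
            · exact List.mem_cons_of_mem _ ((ihmem k).mpr h1)

-- counts are preserved from the whole sorted list to the suffix after the first run
theorem count_drop (x : Int) (xs : List Int) (_hs : (x :: xs).Pairwise (· ≤ ·))
    (k : Int) (hk : k ≠ x) :
    (x :: xs).count k = (xs.dropWhile (fun y => y == x)).count k := by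
  have hsplit : xs = xs.takeWhile (fun y => y == x) ++ xs.dropWhile (fun y => y == x) :=
    (List.takeWhile_append_dropWhile).symm
  have h1 : (xs.takeWhile (fun y => y == x)).count k = 0 := by
    rw [List.count_eq_zero]
    intro hmem
    exact hk (by simpa using List.mem_takeWhile_imp hmem)
  rw [List.count_cons_of_ne (Ne.symm hk)]
  conv_lhs => rw [hsplit]
  rw [List.count_append, h1]
  omega

-- B's scan over a sorted list is the run-head fold with counts taken in any
-- count-equivalent list 'full'
theorem scan_fold : ∀ (col : List Int), col.Pairwise (· ≤ ·) →
    ∀ (full : List Int), (∀ k ∈ col, (full.count k : Int) = (col.count k : Int)) →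
    ∀ b l t, pvRunScan col b l t = (runHeads col).foldl (bstep full) (b, l, t) := by
  intro col
  induction col using runHeads.induct with
  | case1 => intro _ full _ b l t; simp [pvRunScan, runHeads]
  | case2 x xs ih =>
    intro hs full hcnt b l t
    have hfacts := run_facts x xs hs
    have hrest : (xs.dropWhile (fun y => y == x)).Pairwise (· ≤ ·) :=
      (List.pairwise_cons.mp hs).2.sublist (List.dropWhile_sublist _)
    have hcnt' : ∀ k ∈ xs.dropWhile (fun y => y == x),
        (full.count k : Int) = ((xs.dropWhile (fun y => y == x)).count k : Int) := by
      intro k hk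
      have hkx : k ≠ x := ne_of_gt (hfacts.2 k hk)
      have hmem : k ∈ x :: xs := List.mem_cons_of_mem _ ((List.dropWhile_sublist _).mem hk)
      rw [hcnt k hmem]
      exact_mod_cast count_drop x xs hs k hkx
    have hcx : (full.count x : Int) = ((xs.takeWhile (fun y => y == x)).length : Int) + 1 := by
      rw [hcnt x (by simp)]
      exact hfacts.1
    rw [pvRunScan, runHeads, List.foldl_cons]
    have hbstep : bstep full (b, l, t) x =
        (if ((xs.takeWhile (fun y => y == x)).length : Int) + 1 > l
          then (some x, ((xs.takeWhile (fun y => y == x)).length : Int) + 1, false)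
          else if ((xs.takeWhile (fun y => y == x)).length : Int) + 1 = l
            then (b, l, true) else (b, l, t)) := by
      rw [bstep, hcx]
    rw [hbstep]
    by_cases h1 : ((xs.takeWhile (fun y => y == x)).length : Int) + 1 > l
    · rw [if_pos h1, if_pos h1]
      exact ih hrest full hcnt' _ _ _
    · rw [if_neg h1, if_neg h1]
      by_cases h2 : ((xs.takeWhile (fun y => y == x)).length : Int) + 1 = l
      · rw [if_pos h2, if_pos h2]
        exact ih hrest full hcnt' _ _ _
      · rw [if_neg h2, if_neg h2]
        exact ih hrest full hcnt' _ _ _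

-- characterisation of B's fold over any Nodup prefix of distinct values
theorem bfold_char (full p : List Int)
    (hone : ∀ k ∈ p, (1 : Int) ≤ (full.count k : Int)) (hnd : p.Nodup) :
    p.foldl (bstep full) ((none : Option Int), (0 : Int), false) =
      (p.find? (fun k => (full.count k : Int) == maxB full p),
       maxB full p,
       decide (2 ≤ (p.filter (fun k => (full.count k : Int) == maxB full p)).length)) := by
  induction p using List.reverseRecOn with
  | nil => simp [maxB]
  | append_singleton p k ih =>
    have hone' : ∀ j ∈ p, (1 : Int) ≤ (full.count j : Int) :=
      fun j hj => hone j (List.mem_append_left _ hj)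
    have honek : (1 : Int) ≤ (full.count k : Int) := hone k (by simp)
    have hnd' : p.Nodup := hnd.sublist (List.sublist_append_left _ _)
    have hmax : maxB full (p ++ [k]) = max (maxB full p) (full.count k : Int) := by
      simp [maxB, List.foldl_append]
    have hub := (maxB_bounds full p).2
    rw [List.foldl_append, ih hone' hnd', List.foldl_cons, List.foldl_nil]
    rcases lt_trichotomy (maxB full p) ((full.count k : Int)) with hlt | heq | hgt
    · -- new strict maximum: state resets to (some k, count k, false)
      have hm : maxB full (p ++ [k]) = (full.count k : Int) := by
        rw [hmax]; exact max_eq_right (le_of_lt hlt)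
      have hfp : p.filter (fun j => (full.count j : Int) == (full.count k : Int)) = [] := by
        rw [List.filter_eq_nil_iff]
        intro j hj
        have := hub j hj
        simp only [beq_iff_eq]
        omega
      have hfind : (p ++ [k]).find? (fun j => (full.count j : Int) == maxB full (p ++ [k]))
          = some k := by
        rw [hm, List.find?_append]
        have : p.find? (fun j => (full.count j : Int) == (full.count k : Int)) = none := by
          rw [List.find?_eq_none]
          intro j hj
          have := hub j hj
          simp only [beq_iff_eq]
          omega
        rw [this]
        simp [List.find?]
      have hfilt : (p ++ [k]).filter (fun j => (full.count j : Int) == maxB full (p ++ [k]))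
          = [k] := by
        rw [hm, filter_app_singleton, hfp, if_pos (by simp)]
        simp
      rw [bstep]
      simp only []
      rw [if_pos hlt, hfind, hfilt, hm]
      simp
    · -- count k ties the running maximum: tie becomes true
      have hm : maxB full (p ++ [k]) = maxB full p := by rw [hmax]; omega
      have hpne : p ≠ [] := by
        rintro rfl
        simp [maxB] at heq
        omega
      obtain ⟨j, hj, hje⟩ := maxB_attained full p hpne hone'
      have hfind : (p ++ [k]).find? (fun x => (full.count x : Int) == maxB full (p ++ [k]))
          = p.find? (fun x => (full.count x : Int) == maxB full p) := by
        rw [hm, List.find?_append]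
        have : p.find? (fun x => (full.count x : Int) == maxB full p) ≠ none := by
          rw [Ne, List.find?_eq_none]
          intro hcon
          have hc := hcon j hj
          rw [hje] at hc
          simp at hc
        rcases hf : p.find? (fun x => (full.count x : Int) == maxB full p) with _ | v
        · exact absurd hf this
        · rfl
      have hfiltmem : j ∈ p.filter (fun x => (full.count x : Int) == maxB full p) :=
        List.mem_filter.mpr ⟨hj, by simp [hje]⟩
      have hfilt : (p ++ [k]).filter (fun x => (full.count x : Int) == maxB full (p ++ [k]))
          = p.filter (fun x => (full.count x : Int) == maxB full p) ++ [k] := by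
        rw [hm, filter_app_singleton, if_pos (by simp [heq])]
      have hlen : 1 ≤ (p.filter (fun x => (full.count x : Int) == maxB full p)).length :=
        List.length_pos_of_mem hfiltmem
      rw [bstep]
      simp only []
      rw [if_neg (by omega), if_pos heq.symm, hfind, hfilt, hm]
      have hd : decide (2 ≤ ((p.filter (fun x => (full.count x : Int) == maxB full p))
          ++ [k]).length) = true := by
        simp only [List.length_append, List.length_cons, List.length_nil, decide_eq_true_eq]
        omega
      rw [hd]
    · -- count k below the running maximum: nothing changes
      have hm : maxB full (p ++ [k]) = maxB full p := by rw [hmax]; omega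
      have hfind : (p ++ [k]).find? (fun x => (full.count x : Int) == maxB full (p ++ [k]))
          = p.find? (fun x => (full.count x : Int) == maxB full p) := by
        have hbf : ((full.count k : Int) == maxB full p) = false := by
          simp only [beq_eq_false_iff_ne]; omega
        have hkf : List.find? (fun x => (full.count x : Int) == maxB full p) [k] = none := by
          simp only [List.find?, hbf]
        rw [hm, List.find?_append, hkf, Option.or_none]
      have hfilt : (p ++ [k]).filter (fun x => (full.count x : Int) == maxB full (p ++ [k]))
          = p.filter (fun x => (full.count x : Int) == maxB full p) := by
        rw [hm, filter_app_singleton, if_neg (by simp only [beq_iff_eq]; omega)]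
        simp
      rw [bstep]
      simp only []
      rw [if_neg (by omega), if_neg (by omega), hfind, hfilt, hm]

-- extracting the three facts from a singleton filter
theorem filter_singleton_facts (l : List Int) (p : Int → Bool) (w : Int)
    (h : l.filter p = [w]) :
    w ∈ l ∧ p w = true ∧ ∀ x ∈ l, p x = true → x = w := by
  have hw : w ∈ l.filter p := by rw [h]; simp
  obtain ⟨hwl, hpw⟩ := List.mem_filter.mp hw
  refine ⟨hwl, hpw, fun x hx hpx => ?_⟩
  have : x ∈ l.filter p := List.mem_filter.mpr ⟨hx, hpx⟩
  rw [h] at this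
  simpa using this

theorem find?_of_filter_singleton (l : List Int) (p : Int → Bool) (w : Int)
    (h : l.filter p = [w]) : l.find? p = some w := by
  induction l with
  | nil => simp at h
  | cons x t ih =>
    by_cases hx : p x = true
    · rw [List.filter_cons_of_pos hx] at h
      obtain ⟨hxw, -⟩ := List.cons_eq_cons.mp h
      rw [List.find?_cons_of_pos hx, hxw]
    · rw [List.filter_cons_of_neg (by simpa using hx)] at h
      rw [List.find?_cons_of_neg (by simpa using hx)]
      exact ih h

-- the per-column bridge: A's majority vote equals B's sorted-run-scan vote
theorem column_eq (col : List Int) (h : col ≠ []) (fb : Int) :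
    (match pyMajority col with
      | some v => v
      | none => fb) =
    (match (pvRunScan (PySem.List.sorted col (fun v => v) false) none 0 false).1,
           (pvRunScan (PySem.List.sorted col (fun v => v) false) none 0 false).2.2 with
      | some b, false => b
      | _, _ => fb) := by
  -- notation
  set scol := PySem.List.sorted col (fun v => v) false with hscol
  have hperm : scol.Perm col := PySem.List.sorted_perm col (fun v => v) false
  have hsorted : scol.Pairwise (· ≤ ·) := by
    simpa using PySem.List.sorted_pairwise col (fun v => v)
  have hcnt : ∀ k ∈ scol, (col.count k : Int) = (scol.count k : Int) := by
    intro k _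
    exact_mod_cast (hperm.count_eq k).symm
  -- B's scan = fold over run heads with counts in col
  have hscan := scan_fold scol hsorted col hcnt none 0 false
  set p := runHeads scol with hp
  obtain ⟨hnd, hmemrh⟩ := runHeads_facts scol hsorted
  have hmem : ∀ k, k ∈ p ↔ k ∈ col := by
    intro k
    rw [hp, hmemrh k]
    exact hperm.mem_iff
  have hone : ∀ k ∈ p, (1 : Int) ≤ (col.count k : Int) := by
    intro k hk
    have := List.count_pos_iff.mpr ((hmem k).mp hk)
    omega
  have hpne : p ≠ [] := by
    obtain ⟨c, hc⟩ := List.exists_mem_of_ne_nil col h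
    intro hnil
    exact (List.not_mem_nil (a := c)) (hnil ▸ (hmem c).mpr hc)
  have hfold := bfold_char col p hone hnd
  rw [hscan, hfold]
  -- A's side
  rw [pyMajority_char col h]
  -- the two maxima agree
  have honeS : ∀ k ∈ PySem.Set.ofList col, (1 : Int) ≤ (col.count k : Int) := by
    intro k hk
    have := List.count_pos_iff.mpr ((PySem.Set.mem_ofList _ _).mp hk)
    omega
  have hSne : PySem.Set.ofList col ≠ [] := by
    obtain ⟨c, hc⟩ := List.exists_mem_of_ne_nil col h
    intro hnil
    exact (List.not_mem_nil (a := c)) (hnil ▸ (PySem.Set.mem_ofList _ _).mpr hc)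
  have hmemS : ∀ k, k ∈ PySem.Set.ofList col ↔ k ∈ col := fun k => PySem.Set.mem_ofList _ _
  have hMeq : maxvP col (PySem.Set.ofList col) = maxB col p := by
    obtain ⟨jB, hjB, hjBe⟩ := maxB_attained col p hpne hone
    have hle1 : maxB col p ≤ maxvP col (PySem.Set.ofList col) := by
      have := (maxvP_bounds col (PySem.Set.ofList col)).2 jB ((hmemS jB).mpr ((hmem jB).mp hjB))
      omega
    have hle2 : maxvP col (PySem.Set.ofList col) ≤ maxB col p := by
      by_cases h1 : maxvP col (PySem.Set.ofList col) = 1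
      · have := (maxB_bounds col p).2 jB hjB
        have := hone jB hjB
        omega
      · obtain ⟨jA, hjA, hjAe⟩ := maxvP_attained col _ hSne honeS
        have := (maxB_bounds col p).2 jA ((hmem jA).mpr ((hmemS jA).mp hjA))
        omega
    omega
  -- the two filters pick the same elements
  set M := maxB col p with hM
  have hpredeq : ∀ (x : Int),
      ((col.count x : Int) == maxvP col (PySem.Set.ofList col)) =
      ((col.count x : Int) == M) := by
    intro x; rw [hMeq]
  have hfiltA_iff : ∀ w, (PySem.Set.ofList col).filter
      (fun k => (col.count k : Int) == maxvP col (PySem.Set.ofList col)) = [w] ↔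
      p.filter (fun k => (col.count k : Int) == M) = [w] := by
    intro w
    constructor
    · intro hfa
      obtain ⟨hwm, hpw, huq⟩ := filter_singleton_facts _ _ _ hfa
      refine nodup_filter_singleton p hnd w ((hmem w).mpr ((hmemS w).mp hwm)) _ ?_ ?_
      · rw [← hpredeq]; exact hpw
      · intro x hx hpx
        exact huq x ((hmemS x).mpr ((hmem x).mp hx)) (by rw [hpredeq]; exact hpx)
    · intro hfb
      obtain ⟨hwm, hpw, huq⟩ := filter_singleton_facts _ _ _ hfb
      refine nodup_filter_singleton _ (PySem.Set.nodup_ofList _) w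
        ((hmemS w).mpr ((hmem w).mp hwm)) _ ?_ ?_
      · rw [hpredeq]; exact hpw
      · intro x hx hpx
        exact huq x ((hmem x).mpr ((hmemS x).mp hx)) (by rw [← hpredeq]; exact hpx)
  -- the filters are permutations of each other (same Nodup members)
  have hfiltperm : ((PySem.Set.ofList col).filter
      (fun k => (col.count k : Int) == maxvP col (PySem.Set.ofList col))).Perm
      (p.filter (fun k => (col.count k : Int) == M)) := by
    apply (List.perm_ext_iff_of_nodup ((PySem.Set.nodup_ofList _).filter _) (hnd.filter _)).mpr
    intro x
    simp only [List.mem_filter]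
    rw [hpredeq, hmemS, hmem]
  -- case on B's filter
  rcases hfB : p.filter (fun k => (col.count k : Int) == M) with _ | ⟨w, t⟩
  · -- no maximiser at all: impossible since the max is attained, but both sides fall back anyway
    have hfA : (PySem.Set.ofList col).filter
        (fun k => (col.count k : Int) == maxvP col (PySem.Set.ofList col)) = [] := by
      rw [hfB] at hfiltperm
      exact List.Perm.eq_nil hfiltperm
    have hfind : p.find? (fun k => (col.count k : Int) == M) = none := by
      rw [List.find?_eq_none]
      intro x hx hpx
      have : x ∈ p.filter (fun k => (col.count k : Int) == M) :=
        List.mem_filter.mpr ⟨hx, hpx⟩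
      rw [hfB] at this
      simp at this
    rw [hfA, hfind]
  · rcases t with _ | ⟨y, t2⟩
    · -- unique maximiser w: A votes w; B's find? gives w with tie = false
      have hfA := (hfiltA_iff w).mpr hfB
      have hfind : p.find? (fun k => (col.count k : Int) == M) = some w :=
        find?_of_filter_singleton p _ w hfB
      rw [hfA, hfind]
      simp
    · -- two or more maximisers: A returns None; B's tie flag is true
      have hfA : (PySem.Set.ofList col).filter
          (fun k => (col.count k : Int) == maxvP col (PySem.Set.ofList col)) ≠ [] ∧
          ∀ u, (PySem.Set.ofList col).filter
            (fun k => (col.count k : Int) == maxvP col (PySem.Set.ofList col)) ≠ [u] := by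
      -- length ≥ 2 via the permutation
        have hlen : ((PySem.Set.ofList col).filter
            (fun k => (col.count k : Int) == maxvP col (PySem.Set.ofList col))).length
            = (w :: y :: t2).length := by rw [hfiltperm.length_eq, hfB]
        constructor
        · intro hcon; rw [hcon] at hlen; simp at hlen
        · intro u hcon; rw [hcon] at hlen; simp at hlen
      rcases hfA' : (PySem.Set.ofList col).filter
          (fun k => (col.count k : Int) == maxvP col (PySem.Set.ofList col)) with _ | ⟨u, t'⟩
      · exact absurd hfA' hfA.1
      · rcases t' with _ | ⟨v, t''⟩
        · exact absurd hfA' (by simpa using hfA.2 u)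
        · have h2 : decide (2 ≤ (w :: y :: t2).length) = true := by simp
          rw [h2]
          rcases p.find? (fun k => (col.count k : Int) == M) with _ | v <;> rfl

-- the whole functions agree: same outer fold over the same range, equal bodies
theorem ab_eq (predictions : List (List Int)) (weight_index : Option Int)
    (hp : predictions ≠ []) :
    majority_voting_pred predictions weight_index
      = majority_voting_pred_alt predictions weight_index := by
  unfold majority_voting_pred majority_voting_pred_alt
  simp only []
  congr 1
  funext voted i
  congr 1
  congr 1
  have hcol : predictions.map (fun x => PySem.List.pyGetD x i 0) ≠ [] := by
    simp [hp]
  exact column_eq (predictions.map (fun x => PySem.List.pyGetD x i 0)) hcol _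

-- ===== VERDICT (by name: the statement is the Claim_ definition above) =====
theorem majority_voting_pred_spec : Claim_equal_majority_voting_pred := by
  unfold Claim_equal_majority_voting_pred
  intro predictions weight_index _ hpre
  unfold Spec_majority_voting_pred
  exact ab_eq predictions weight_index hpre.1
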